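-- pv_equiv track=rewrite | github.com/paulnov/auto-cv-web | cv.py | italicize_journals
-- ===== SOURCE A (Python) =====
-- journal_list = [
--     'Science',
--     'BMJ Open',
--     'AEJ: Applied',
--     'Economics and Politics Weekly',
--     'India Policy Forum',
--     'American Economic Review',
--     'World Bank Economic Review',
--     'Economic Journal',
--     'Review of Economics and Statistics',
--     'The Review of International Organizations']
--
-- def italicize_journals(c, target):
--     for journal in journal_list:
--         if target == 'web':
--             c = c.replace(journal, f'<i>{journal}</i>')
--         elif target == 'cv':
--             c = c.replace(journal, '\\textit{' + journal + '}')
--     if target == 'cv':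
--         c = c.replace('Paul Novosad', '\\textbf{Paul Novosad}')
--     return c
-- ===== SOURCE B (Python) =====
-- journal_list = [
--     'Science',
--     'BMJ Open',
--     'AEJ: Applied',
--     'Economics and Politics Weekly',
--     'India Policy Forum',
--     'American Economic Review',
--     'World Bank Economic Review',
--     'Economic Journal',
--     'Review of Economics and Statistics',
--     'The Review of International Organizations']
--
-- def italicize_journals(c, target):
--     # Single left-to-right scan: at each position take the first listed name
--     # that matches, emit its wrapped form, and continue after the match.
--     if target == 'web':
--         pats = [(j, '<i>' + j + '</i>') for j in journal_list]
--     elif target == 'cv':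
--         pats = [(j, '\\textit{' + j + '}') for j in journal_list] \
--              + [('Paul Novosad', '\\textbf{Paul Novosad}')]
--     else:
--         return c
--     out = []
--     i = 0
--     n = len(c)
--     while i < n:
--         for p, w in pats:
--             if c.startswith(p, i):
--                 out.append(w)
--                 i += len(p)
--                 break
--         else:
--             out.append(c[i])
--             i += 1
--     return ''.join(out)
-- ===== Notes on version B (the rewrite author's own statement) =====
-- stated objective: alternative
-- what changed: Replaces the ten-plus sequential full-string replace passes (one per journal, plus the author pass in cv mode) with a single left-to-right scan that at each position tries the pattern list in order and emits the wrapped form of the first match.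
import Mathlib
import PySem

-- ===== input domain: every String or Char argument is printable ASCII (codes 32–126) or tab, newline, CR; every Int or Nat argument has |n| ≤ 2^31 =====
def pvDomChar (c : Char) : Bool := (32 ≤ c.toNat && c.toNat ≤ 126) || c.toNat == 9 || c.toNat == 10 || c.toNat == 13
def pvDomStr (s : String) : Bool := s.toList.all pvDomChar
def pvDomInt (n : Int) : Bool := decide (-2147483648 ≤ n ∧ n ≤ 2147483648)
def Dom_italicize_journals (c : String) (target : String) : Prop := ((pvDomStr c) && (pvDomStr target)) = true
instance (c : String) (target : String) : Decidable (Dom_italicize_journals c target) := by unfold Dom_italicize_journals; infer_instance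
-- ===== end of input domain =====

-- B replaces A's sequential per-journal replace passes with a single left-to-right
-- multi-pattern scan (alternative decomposition, same asymptotic cost).

-- ===== PORT A =====
def pvJournalList : List String := [
  "Science",
  "BMJ Open",
  "AEJ: Applied",
  "Economics and Politics Weekly",
  "India Policy Forum",
  "American Economic Review",
  "World Bank Economic Review",
  "Economic Journal",
  "Review of Economics and Statistics",
  "The Review of International Organizations"]

-- port of A: one str.replace pass per journal, then the author pass in cv mode
def italicize_journals (c : String) (target : String) : String :=
  let c1 := pvJournalList.foldl (fun s journal =>
    if target = "web" then PySem.Str.replace s journal ("<i>" ++ journal ++ "</i>")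
    else if target = "cv" then PySem.Str.replace s journal ("\\textit{" ++ journal ++ "}")
    else s) c
  if target = "cv" then PySem.Str.replace c1 "Paul Novosad" "\\textbf{Paul Novosad}" else c1


-- ===== PORT B =====
-- B-side: (pattern, wrapped) pairs per target, and a single left-to-right scan
def pvWebPats : List (List Char × List Char) :=
  pvJournalList.map (fun j => (j.toList, ("<i>" ++ j ++ "</i>").toList))

def pvCvPats : List (List Char × List Char) :=
  pvJournalList.map (fun j => (j.toList, ("\\textit{" ++ j ++ "}").toList))
    ++ [("Paul Novosad".toList, "\\textbf{Paul Novosad}".toList)]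

-- the while loop of Source B: first matching pattern at the current position, else copy one char
def pvScan (prs : List (List Char × List Char)) : List Char → List Char
  | [] => []
  | c :: t =>
    match prs.find? (fun pw => pw.1.isPrefixOf (c :: t)) with
    | some pw => pw.2 ++ pvScan prs (List.drop (pw.1.length - 1) t)
    | none => c :: pvScan prs t
  termination_by cs => cs.length
  decreasing_by
    · simp only [List.length_drop, List.length_cons]; omega
    · simp only [List.length_cons]; omega

def italicize_journals_alt (c : String) (target : String) : String :=
  if target = "web" then String.ofList (pvScan pvWebPats c.toList)
  else if target = "cv" then String.ofList (pvScan pvCvPats c.toList)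
  else c


-- ===== PRECONDITION & SPEC =====
def Spec_italicize_journals (c : String) (target : String) (out : String) : Prop := out = italicize_journals_alt c target
instance (c : String) (target : String) (out : String) : Decidable (Spec_italicize_journals c target out) := by unfold Spec_italicize_journals; infer_instance

-- ===== CLAIM (what is proved, stated in full; the proofs are below) =====
def Claim_equal_italicize_journals : Prop := ∀ (c : String) (target : String), Dom_italicize_journals c target → Spec_italicize_journals c target (italicize_journals c target)

-- ===== LEMMAS AND PROOFS =====


-- proof-side helpers: a direct recursive form of str.replace, and the
-- non-interference conditions between patterns and wrapped replacements

def pvRepl (old new : List Char) : List Char → List Char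
  | [] => []
  | c :: t =>
    if old.isPrefixOf (c :: t) then new ++ pvRepl old new (List.drop (old.length - 1) t)
    else c :: pvRepl old new t
  termination_by cs => cs.length
  decreasing_by
    · simp only [List.length_drop, List.length_cons]; omega
    · simp only [List.length_cons]; omega

-- pvNoCross x y: pattern y cannot start matching at any position inside x,
-- whatever text follows x
def pvNoCross (x y : List Char) : Bool :=
  (List.range x.length).all fun i => !(y.isPrefixOf (x.drop i)) && !((x.drop i).isPrefixOf y)

theorem pvNoCross_spec {x y : List Char} (h : pvNoCross x y = true) :
    ∀ i < x.length, ¬ (y <+: x.drop i) ∧ ¬ (x.drop i <+: y) := by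
  intro i hi
  have h2 := List.all_eq_true.mp h i (List.mem_range.mpr hi)
  rw [Bool.and_eq_true, Bool.not_eq_true', Bool.not_eq_true'] at h2
  constructor
  · intro hc; rw [List.isPrefixOf_iff_prefix.mpr hc] at h2; exact absurd h2.1 (by simp)
  · intro hc; rw [List.isPrefixOf_iff_prefix.mpr hc] at h2; exact absurd h2.2 (by simp)

-- pvR a b: the earlier pattern a.1 cannot start inside the later pattern b.1;
-- the later pattern b.1 cannot start inside the earlier replacement a.2;
-- and a.2's first char never occurs in b.1
def pvR (a b : List Char × List Char) : Bool :=
  pvNoCross b.1 a.1 && pvNoCross a.2 b.1 && !(b.1.contains a.2.headI)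

theorem pvR_1 {a b : List Char × List Char} (h : pvR a b = true) : pvNoCross b.1 a.1 = true := by
  rw [pvR, Bool.and_eq_true, Bool.and_eq_true] at h; exact h.1.1

theorem pvR_2 {a b : List Char × List Char} (h : pvR a b = true) : pvNoCross a.2 b.1 = true := by
  rw [pvR, Bool.and_eq_true, Bool.and_eq_true] at h; exact h.1.2

theorem pvR_3 {a b : List Char × List Char} (h : pvR a b = true) : a.2.headI ∉ b.1 := by
  rw [pvR, Bool.and_eq_true, Bool.and_eq_true, Bool.not_eq_true'] at h
  intro hm
  rw [List.contains_iff_mem.mpr hm] at h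
  exact absurd h.2 (by simp)

def pvOK (prs : List (List Char × List Char)) : Prop :=
  (∀ pr ∈ prs, pr.1 ≠ [] ∧ pr.2 ≠ []) ∧ prs.Pairwise (fun a b => pvR a b = true)

theorem pvRepl_eq_go (old new : List Char) (hne : old ≠ []) :
    ∀ (fuel : Nat) (l acc : List Char), l.length ≤ fuel →
      PySem.Chars.replace.go old new fuel l acc = acc.reverse ++ pvRepl old new l := by
  intro fuel
  induction fuel with
  | zero =>
      intro l acc hl
      have hnil : l = [] := List.length_eq_zero_iff.mp (Nat.le_zero.mp hl)
      subst hnil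
      rw [PySem.Chars.replace.go.eq_def]
      simp [pvRepl]
  | succ n ih =>
      intro l acc hl
      cases l with
      | nil => rw [PySem.Chars.replace.go.eq_def]; simp [pvRepl]
      | cons c t =>
          rw [PySem.Chars.replace.go.eq_def]
          by_cases hp : old.isPrefixOf (c :: t) = true
          · simp only [hp, if_true]
            obtain ⟨o, os, rfl⟩ : ∃ o os, old = o :: os := by
              cases old with
              | nil => exact absurd rfl hne
              | cons o os => exact ⟨o, os, rfl⟩
            have hdrop : List.drop (o :: os).length (c :: t) = List.drop ((o :: os).length - 1) t := by
              simp
            have hle : (List.drop ((o :: os).length - 1) t).length ≤ n := by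
              simp only [List.length_drop]
              simp only [List.length_cons] at hl
              omega
            rw [hdrop, ih _ _ hle]
            have hstep : pvRepl (o :: os) new (c :: t)
                = new ++ pvRepl (o :: os) new (List.drop ((o :: os).length - 1) t) := by
              rw [pvRepl, if_pos hp]
            rw [hstep]
            simp
          · simp only [hp]
            have hle : t.length ≤ n := by
              simp only [List.length_cons] at hl; omega
            rw [ih _ _ hle]
            have hstep : pvRepl old new (c :: t) = c :: pvRepl old new t := by
              rw [pvRepl, if_neg hp]
            rw [hstep]
            simp

theorem pvRepl_eq_replace (old new s : List Char) (hne : old ≠ []) :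
    PySem.Chars.replace s old new = pvRepl old new s := by
  unfold PySem.Chars.replace
  rw [if_neg (by simp [hne])]
  simpa using pvRepl_eq_go old new hne s.length s [] le_rfl

-- a prefix of an append is a prefix of the left part or extends past it
theorem pvPrefixAppend {p a u : List Char} (h : p <+: a ++ u) : p <+: a ∨ a <+: p :=
  List.prefix_or_prefix_of_prefix h (List.prefix_append a u)

-- equation lemma for the cons case of pvScan
theorem pvScan_cons (prs : List (List Char × List Char)) (c : Char) (t : List Char) :
    pvScan prs (c :: t) =
      match prs.find? (fun pw => pw.1.isPrefixOf (c :: t)) with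
      | some pw => pw.2 ++ pvScan prs (List.drop (pw.1.length - 1) t)
      | none => c :: pvScan prs t := by
  rw [pvScan.eq_def]

theorem pvScan_nil (prs : List (List Char × List Char)) : pvScan prs [] = [] := by
  rw [pvScan.eq_def]

theorem pvRepl_nil (old new : List Char) : pvRepl old new [] = [] := by
  rw [pvRepl.eq_def]

-- equation lemmas for pvRepl
theorem pvRepl_cons_pos (old new : List Char) (c : Char) (t : List Char)
    (h : old.isPrefixOf (c :: t) = true) :
    pvRepl old new (c :: t) = new ++ pvRepl old new (List.drop (old.length - 1) t) := by
  rw [pvRepl, if_pos h]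

theorem pvRepl_cons_neg (old new : List Char) (c : Char) (t : List Char)
    (h : ¬ old.isPrefixOf (c :: t) = true) :
    pvRepl old new (c :: t) = c :: pvRepl old new t := by
  rw [pvRepl, if_neg h]

-- L2: no occurrence of old starting inside q ⇒ replace walks straight through q
theorem pvRepl_append (p w : List Char) :
    ∀ (q u : List Char), (∀ i < q.length, ¬ p <+: (q.drop i ++ u)) →
      pvRepl p w (q ++ u) = q ++ pvRepl p w u := by
  intro q
  induction q with
  | nil => intro u _; simp
  | cons q0 q' ih =>
      intro u h
      have h0 : ¬ p.isPrefixOf (q0 :: (q' ++ u)) = true := by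
        intro hc
        exact h 0 (by simp) (by simpa using List.isPrefixOf_iff_prefix.mp hc)
      rw [List.cons_append, pvRepl_cons_neg _ _ _ _ h0,
        ih u (fun i hi => by simpa using h (i + 1) (by simp only [List.length_cons]; omega)),
        ← List.cons_append]

-- L3: no pattern of prs can match starting inside w ⇒ scan walks straight through w
theorem pvScan_append (prs : List (List Char × List Char)) :
    ∀ (w u : List Char), (∀ r ∈ prs, ∀ i < w.length, ¬ r.1 <+: (w.drop i ++ u)) →
      pvScan prs (w ++ u) = w ++ pvScan prs u := by
  intro w
  induction w with
  | nil => intro u _; simp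
  | cons w0 w' ih =>
      intro u h
      have hnone : prs.find? (fun pw => pw.1.isPrefixOf (w0 :: (w' ++ u))) = none := by
        rw [List.find?_eq_none]
        intro r hr hc
        exact h r hr 0 (by simp) (by simpa using List.isPrefixOf_iff_prefix.mp hc)
      rw [List.cons_append, pvScan_cons, hnone,
        ih u (fun r hr i hi => by simpa using h r hr (i + 1) (by simp only [List.length_cons]; omega)),
        ← List.cons_append]

-- L4: patterns avoid the first char of w, so a pattern prefix of the replaced
-- text is already a prefix of the original text
theorem pvRepl_prefix (p w : List Char) (hw : w ≠ []) :
    ∀ (n : Nat) (t : List Char), t.length ≤ n → ∀ (r : List Char), w.headI ∉ r →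
      r <+: pvRepl p w t → r <+: t := by
  intro n
  induction n with
  | zero =>
      intro t ht r _ hr
      have : t = [] := List.length_eq_zero_iff.mp (Nat.le_zero.mp ht)
      subst this
      simpa [pvRepl] using hr
  | succ m ih =>
      intro t ht r hhead hr
      cases t with
      | nil => simpa [pvRepl] using hr
      | cons c t' =>
          by_cases hp : p.isPrefixOf (c :: t') = true
          · rw [pvRepl, if_pos hp] at hr
            cases r with
            | nil => exact List.nil_prefix
            | cons r0 r' =>
                obtain ⟨v0, vs, rfl⟩ : ∃ v0 vs, w = v0 :: vs := by
                  cases w with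
                  | nil => exact absurd rfl hw
                  | cons v0 vs => exact ⟨v0, vs, rfl⟩
                rw [List.cons_append, List.cons_prefix_cons] at hr
                exact absurd (hr.1 ▸ List.mem_cons_self) hhead
          · rw [pvRepl, if_neg hp] at hr
            cases r with
            | nil => exact List.nil_prefix
            | cons r0 r' =>
                rw [List.cons_prefix_cons] at hr ⊢
                refine ⟨hr.1, ih t' (by simp at ht; omega) r'
                  (fun hm => hhead (List.mem_cons_of_mem _ hm)) hr.2⟩

-- the first matching pattern at the head is stable under rewriting the tail
theorem pvFindShift :
    ∀ (ps : List (List Char × List Char)), ps.Pairwise (fun a b => pvR a b = true) →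
      (∀ pr ∈ ps, pr.1 ≠ []) →
      ∀ (c X : List Char) (q wq : List Char),
        ps.find? (fun pw => pw.1.isPrefixOf c) = some (q, wq) →
        ps.find? (fun pw => pw.1.isPrefixOf (q ++ X)) = some (q, wq) := by
  intro ps
  induction ps with
  | nil => intro _ _ c X q wq h; simp at h
  | cons rp ps ih =>
      intro hpair hne c X q wq hfind
      rw [List.pairwise_cons] at hpair
      rw [List.find?_cons] at hfind
      by_cases hr : rp.1.isPrefixOf c = true
      · simp only [hr] at hfind
        have hrq : rp = (q, wq) := by simpa using hfind
        subst hrq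
        rw [List.find?_cons]
        have hq : (q, wq).1.isPrefixOf (q ++ X) = true :=
          List.isPrefixOf_iff_prefix.mpr (List.prefix_append q X)
        simp only [hq]
      · rw [Bool.not_eq_true] at hr
        simp only [hr] at hfind
        rw [← Bool.not_eq_true] at hr
        have hqmem : (q, wq) ∈ ps := List.mem_of_find?_eq_some hfind
        have hqc : q <+: c := by
          simpa [List.isPrefixOf_iff_prefix] using List.find?_some hfind
        have hR : pvR rp (q, wq) = true := hpair.1 _ hqmem
        have hqne : q ≠ [] := hne (q, wq) (List.mem_cons_of_mem _ hqmem)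
        have hrneg : rp.1.isPrefixOf (q ++ X) = false := by
          rw [← Bool.not_eq_true]
          intro hc
          rcases pvPrefixAppend (List.isPrefixOf_iff_prefix.mp hc) with h1 | h2
          · exact hr (List.isPrefixOf_iff_prefix.mpr (h1.trans hqc))
          · have h3 := (pvNoCross_spec (pvR_1 hR) 0 (by
              cases q with
              | nil => exact absurd rfl hqne
              | cons _ _ => simp)).2
            simp only [List.drop_zero] at h3
            exact h3 h2
        rw [List.find?_cons]
        simp only [hrneg]
        exact ih hpair.2 (fun pr hpr => hne pr (List.mem_cons_of_mem _ hpr)) c X q wq hfind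

-- main step: scanning with (p,w) first equals replacing p by w and scanning the rest
theorem pvScanStep (p w : List Char) (ps : List (List Char × List Char))
    (_hp : p ≠ []) (hw : w ≠ [])
    (hne : ∀ pr ∈ ps, pr.1 ≠ [] ∧ pr.2 ≠ [])
    (hrel : ∀ pr ∈ ps, pvR (p, w) pr = true)
    (hpair : ps.Pairwise (fun a b => pvR a b = true)) :
    ∀ (n : Nat) (c : List Char), c.length ≤ n →
      pvScan ((p, w) :: ps) c = pvScan ps (pvRepl p w c) := by
  intro n
  induction n with
  | zero =>
      intro c hc
      have hcn : c = [] := List.length_eq_zero_iff.mp (Nat.le_zero.mp hc)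
      subst hcn
      rw [pvScan_nil, pvRepl_nil, pvScan_nil]
  | succ m ih =>
      intro c hc
      cases c with
      | nil => rw [pvScan_nil, pvRepl_nil, pvScan_nil]
      | cons c0 t =>
          rw [pvScan_cons, List.find?_cons]
          by_cases hp1 : p.isPrefixOf (c0 :: t) = true
          · simp only [hp1]
            rw [pvRepl_cons_pos _ _ _ _ hp1,
              pvScan_append ps w (pvRepl p w (List.drop (p.length - 1) t))
                (by
                  intro r hr i hi hpre
                  rcases pvPrefixAppend hpre with h1 | h2
                  · exact (pvNoCross_spec (pvR_2 (hrel r hr)) i hi).1 h1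
                  · exact (pvNoCross_spec (pvR_2 (hrel r hr)) i hi).2 h2)]
            have hle : (List.drop (p.length - 1) t).length ≤ m := by
              simp only [List.length_drop]
              simp only [List.length_cons] at hc
              omega
            rw [ih _ hle]
          · rw [Bool.not_eq_true] at hp1
            simp only [hp1]
            rw [← Bool.not_eq_true] at hp1
            cases hfind : List.find? (fun pw => pw.1.isPrefixOf (c0 :: t)) ps with
            | none =>
                rw [pvRepl_cons_neg _ _ _ _ hp1, pvScan_cons]
                have hnone2 : ps.find? (fun pw => pw.1.isPrefixOf (c0 :: pvRepl p w t)) = none := by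
                  rw [List.find?_eq_none]
                  intro r hr hc2
                  have horig := List.find?_eq_none.mp hfind r hr
                  apply horig
                  rw [List.isPrefixOf_iff_prefix] at hc2 ⊢
                  cases hr1 : r.1 with
                  | nil => exact List.nil_prefix
                  | cons r0 r' =>
                      rw [hr1] at hc2
                      rw [List.cons_prefix_cons] at hc2
                      rw [List.cons_prefix_cons]
                      refine ⟨hc2.1, pvRepl_prefix p w hw t.length t le_rfl r' ?_ hc2.2⟩
                      have hni := pvR_3 (hrel r hr)
                      rw [hr1] at hni
                      exact fun hm => hni (List.mem_cons_of_mem _ hm)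
                rw [hnone2]
                have hle : t.length ≤ m := by simp only [List.length_cons] at hc; omega
                rw [ih _ hle]
            | some qwq =>
                obtain ⟨q, wq⟩ := qwq
                simp only []
                have hqmem : (q, wq) ∈ ps := List.mem_of_find?_eq_some hfind
                have hqpre : q <+: c0 :: t :=
                  List.isPrefixOf_iff_prefix.mp (by simpa using List.find?_some hfind)
                have hqne : q ≠ [] := (hne _ hqmem).1
                obtain ⟨u, hu⟩ := hqpre
                obtain ⟨q0, qt, rfl⟩ : ∃ q0 qt, q = q0 :: qt := by
                  cases q with
                  | nil => exact absurd rfl hqne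
                  | cons q0 qt => exact ⟨q0, qt, rfl⟩
                rw [List.cons_append] at hu
                injection hu with hu0 hut
                have hdropu : List.drop ((q0 :: qt).length - 1) t = u := by
                  rw [← hut]
                  simp
                have hrepl : pvRepl p w (c0 :: t) = (q0 :: qt) ++ pvRepl p w u := by
                  rw [show (c0 :: t) = (q0 :: qt) ++ u by rw [List.cons_append, hu0, hut]]
                  apply pvRepl_append
                  intro i hi hpre
                  rcases pvPrefixAppend hpre with h1 | h2
                  · exact (pvNoCross_spec (pvR_1 (hrel _ hqmem)) i hi).1 h1
                  · exact (pvNoCross_spec (pvR_1 (hrel _ hqmem)) i hi).2 h2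
                rw [hrepl]
                have hshift := pvFindShift ps hpair (fun pr hpr => (hne pr hpr).1)
                  (c0 :: t) (pvRepl p w u) (q0 :: qt) wq hfind
                rw [List.cons_append] at hshift ⊢
                rw [pvScan_cons, hshift]
                show _ = wq ++ pvScan ps (List.drop ((q0 :: qt).length - 1) (qt ++ pvRepl p w u))
                have hdrop2 : List.drop ((q0 :: qt).length - 1) (qt ++ pvRepl p w u)
                    = pvRepl p w u := by simp
                rw [hdrop2, hdropu]
                have hle : u.length ≤ m := by
                  have : t.length = qt.length + u.length := by
                    rw [← hut]; simp
                  simp only [List.length_cons] at hc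
                  omega
                rw [ih _ hle]

theorem pvScan_nil_pats : ∀ (c : List Char), pvScan [] c = c := by
  intro c
  induction c with
  | nil => rw [pvScan_nil]
  | cons c0 t ih => rw [pvScan_cons]; simp [ih]

theorem pvFoldEq :
    ∀ (prs : List (List Char × List Char)), pvOK prs →
      ∀ (c : List Char), prs.foldl (fun s pw => pvRepl pw.1 pw.2 s) c = pvScan prs c := by
  intro prs
  induction prs with
  | nil => intro _ c; exact (pvScan_nil_pats c).symm
  | cons pw ps ih =>
      intro hok c
      obtain ⟨hne, hpair⟩ := hok
      rw [List.pairwise_cons] at hpair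
      rw [List.foldl_cons,
        ih ⟨fun pr hpr => hne pr (List.mem_cons_of_mem _ hpr), hpair.2⟩ (pvRepl pw.1 pw.2 c)]
      exact (pvScanStep pw.1 pw.2 ps (hne pw List.mem_cons_self).1 (hne pw List.mem_cons_self).2
        (fun pr hpr => hne pr (List.mem_cons_of_mem _ hpr)) hpair.1 hpair.2
        c.length c le_rfl).symm

theorem pvOK_web : pvOK pvWebPats := by unfold pvOK; decide

theorem pvOK_cv : pvOK pvCvPats := by unfold pvOK; decide

-- bridge: the String-level replace fold equals the list-level pvRepl fold
theorem pvFoldToList (wrap : String → String) :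
    ∀ (js : List String) (c : String), (∀ j ∈ js, j ≠ "") →
      (js.foldl (fun s j => PySem.Str.replace s j (wrap j)) c).toList
      = (js.map (fun j => (j.toList, (wrap j).toList))).foldl
          (fun s pw => pvRepl pw.1 pw.2 s) c.toList := by
  intro js
  induction js with
  | nil => intro c _; simp
  | cons j js ih =>
      intro c hne
      rw [List.foldl_cons, List.map_cons, List.foldl_cons,
        ih _ (fun x hx => hne x (List.mem_cons_of_mem _ hx))]
      congr 1
      rw [PySem.Str.toList_replace]
      exact pvRepl_eq_replace _ _ _
        (fun h => hne j List.mem_cons_self (String.toList_eq_nil_iff.mp h))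

theorem pvFoldlId : ∀ (l : List String) (c : String), l.foldl (fun s _ => s) c = c := by
  intro l
  induction l with
  | nil => intro c; rfl
  | cons x xs ih => intro c; rw [List.foldl_cons]; exact ih c

-- ===== VERDICT (by name: the statement is the Claim_ definition above) =====
theorem italicize_journals_spec : Claim_equal_italicize_journals := by
  unfold Claim_equal_italicize_journals
  intro c target _
  unfold Spec_italicize_journals italicize_journals italicize_journals_alt
  by_cases hweb : target = "web"
  · subst hweb
    rw [← String.toList_inj]
    simp only [String.reduceEq, reduceIte, String.toList_ofList]
    rw [pvFoldToList (fun j => "<i>" ++ j ++ "</i>") pvJournalList c (by decide)]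
    exact pvFoldEq pvWebPats pvOK_web c.toList
  · by_cases hcv : target = "cv"
    · subst hcv
      rw [← String.toList_inj]
      simp only [String.reduceEq, reduceIte, String.toList_ofList]
      rw [PySem.Str.toList_replace,
        pvRepl_eq_replace _ _ _ (by decide),
        pvFoldToList (fun j => "\\textit{" ++ j ++ "}") pvJournalList c (by decide)]
      have h := pvFoldEq pvCvPats pvOK_cv c.toList
      rw [pvCvPats, List.foldl_append] at h
      exact h
    · rw [← String.toList_inj]
      simp only [if_neg hweb, if_neg hcv]
      rw [pvFoldlId]
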